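-- pv_equiv track=rewrite | github.com/Stefan-Ladwig/binary_expression_tree | parsing_expression.py | check_operator
-- ===== SOURCE A (Python) =====
-- def check_operator(operators, input):
--     bracket_level = 0
--     for i, c in enumerate(input):
--
--         if c == '(':
--             bracket_level += 1
--
--         elif c == ')':
--             bracket_level -= 1
--
--         elif c in operators and bracket_level == 0:
--             if i == 0 and c == '-':
--                 continue
--             return i
--
--     return None
-- ===== SOURCE B (Python) =====
-- def _skip_group(s, i):
--     # Jump past a bracket group: consume chars starting at i (a '(' or ')')
--     # until the running depth returns to 0; returns the index just after,
--     # or len(s) if the group never closes.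
--     d = 0
--     while i < len(s):
--         d += (s[i] == '(') - (s[i] == ')')
--         i += 1
--         if d == 0:
--             return i
--     return i
--
--
-- def check_operator(operators, input):
--     # Scan only at bracket depth 0, jumping over whole bracket groups.
--     i = 0
--     n = len(input)
--     while i < n:
--         c = input[i]
--         if c in '()':
--             i = _skip_group(input, i)
--         elif c in operators and not (i == 0 and c == '-'):
--             return i
--         else:
--             i += 1
--     return None
-- ===== Notes on version B (the rewrite author's own statement) =====
-- stated objective: alternative
-- what changed: B replaces A's per-character bracket-level counter scan with a jump scan: the main loop only ever stands at depth-0 positions and, on meeting a parenthesis, a matching-bracket helper jumps past the entire bracket group, so no depth state is threaded through the search loop.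
import Mathlib
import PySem

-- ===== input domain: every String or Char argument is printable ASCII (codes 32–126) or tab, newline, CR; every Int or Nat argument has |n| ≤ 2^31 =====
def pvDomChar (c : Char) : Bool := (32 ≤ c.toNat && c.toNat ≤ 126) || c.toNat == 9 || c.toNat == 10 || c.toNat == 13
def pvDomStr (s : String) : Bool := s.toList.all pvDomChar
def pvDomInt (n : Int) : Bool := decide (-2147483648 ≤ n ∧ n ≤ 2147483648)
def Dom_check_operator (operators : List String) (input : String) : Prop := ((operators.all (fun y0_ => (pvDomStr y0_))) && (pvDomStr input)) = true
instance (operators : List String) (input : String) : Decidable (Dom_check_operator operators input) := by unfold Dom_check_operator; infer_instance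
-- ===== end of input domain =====

-- B (alternative): replaces A's per-character depth-counter scan by a jump scan
-- whose main loop only stands at depth-0 positions and skips whole bracket
-- groups via a matching-bracket helper.

-- ===== PORT A =====
-- loop of A: state = bracket_level, early return via Option
def coA (operators : List String) : List (Int × Char) → Int → Option Int
  | [], _ => none
  | (i, c) :: rest, lvl =>
    if c = '(' then coA operators rest (lvl + 1)
    else if c = ')' then coA operators rest (lvl - 1)
    else if operators.contains (String.singleton c) && lvl == 0 then
      (if i == 0 && c == '-' then coA operators rest lvl else some i)
    else coA operators rest lvl

def check_operator (operators : List String) (input : String) : Option Int :=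
  coA operators (PySem.List.enumerate input.toList 0) 0

-- ===== PORT B =====
-- _skip_group: consume chars until the running depth returns to 0;
-- returns (index just past the group, remaining characters)
def skipB : List Char → Int → Int → Int × List Char
  | [], _, i => (i, [])
  | c :: rest, d, i =>
    let d' := d + (if c = '(' then 1 else 0) - (if c = ')' then 1 else 0)
    if d' = 0 then (i + 1, rest) else skipB rest d' (i + 1)

theorem skipB_len : ∀ (l : List Char) (d i : Int), (skipB l d i).2.length ≤ l.length := by
  intro l
  induction l with
  | nil => intro d i; simp [skipB]
  | cons c rest ih =>
    intro d i
    by_cases h : (d + (if c = '(' then (1:Int) else 0) - (if c = ')' then 1 else 0)) = 0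
    · simp [skipB, h]
    · simp only [skipB, if_neg h, List.length_cons]
      exact le_trans (ih _ _) (Nat.le_succ _)

-- main loop of B: scan at depth 0 only, jumping over bracket groups
def mainB (operators : List String) : List Char → Int → Option Int
  | [], _ => none
  | c :: rest, i =>
    if c = '(' ∨ c = ')' then
      mainB operators (skipB (c :: rest) 0 i).2 (skipB (c :: rest) 0 i).1
    else if operators.contains (String.singleton c) && !(i == 0 && c == '-') then some i
    else mainB operators rest (i + 1)
termination_by l => l.length
decreasing_by
  · -- the skipped group contains at least the opening character
    rename_i h
    have hd : (0 + (if c = '(' then (1:Int) else 0) - (if c = ')' then 1 else 0)) ≠ 0 := by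
      rcases h with h | h <;> (subst h; decide)
    simp only [skipB, if_neg hd, List.length_cons]
    exact Nat.lt_succ_of_le (skipB_len _ _ _)
  · simp

def check_operator_alt (operators : List String) (input : String) : Option Int :=
  mainB operators input.toList 0

-- ===== PRECONDITION & SPEC =====
def Spec_check_operator (operators : List String) (input : String) (out : Option Int) : Prop := out = check_operator_alt operators input
instance (operators : List String) (input : String) (out : Option Int) : Decidable (Spec_check_operator operators input out) := by unfold Spec_check_operator; infer_instance

-- ===== CLAIM =====
def Claim_equal_check_operator : Prop := ∀ (operators : List String) (input : String), Dom_check_operator operators input → Spec_check_operator operators input (check_operator operators input)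

-- ===== LEMMAS AND PROOFS =====

-- while the depth is nonzero, A's loop behaves exactly like skipping the group
theorem coA_skip (operators : List String) :
    ∀ (l : List Char) (d i : Int), d ≠ 0 →
      coA operators (PySem.List.enumerate l i) d
        = coA operators (PySem.List.enumerate (skipB l d i).2 (skipB l d i).1) 0 := by
  intro l
  induction l with
  | nil => intro d i _; simp [skipB, PySem.List.enumerate_nil, coA]
  | cons c rest ih =>
    intro d i hd
    by_cases h1 : c = '('
    · have hδ : d + (if c = '(' then (1:Int) else 0) - (if c = ')' then 1 else 0) = d + 1 := by
        simp [h1]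
      have hskip : skipB (c :: rest) d i
          = if d + 1 = 0 then (i + 1, rest) else skipB rest (d + 1) (i + 1) := by
        simp only [skipB]; rw [hδ]
      simp only [PySem.List.enumerate_cons, coA, if_pos h1, hskip]
      by_cases h0 : d + 1 = 0
      · rw [if_pos h0, h0]
      · rw [if_neg h0]; exact ih (d + 1) (i + 1) h0
    · by_cases h2 : c = ')'
      · have hδ : d + (if c = '(' then (1:Int) else 0) - (if c = ')' then 1 else 0) = d - 1 := by
          simp [h2]
        have hskip : skipB (c :: rest) d i
            = if d - 1 = 0 then (i + 1, rest) else skipB rest (d - 1) (i + 1) := by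
          simp only [skipB]; rw [hδ]
        simp only [PySem.List.enumerate_cons, coA, if_neg h1, if_pos h2, hskip]
        by_cases h0 : d - 1 = 0
        · rw [if_pos h0, h0]
        · rw [if_neg h0]; exact ih (d - 1) (i + 1) h0
      · have hδ : d + (if c = '(' then (1:Int) else 0) - (if c = ')' then 1 else 0) = d := by
          simp [h1, h2]
        have hskip : skipB (c :: rest) d i
            = if d = 0 then (i + 1, rest) else skipB rest d (i + 1) := by
          simp only [skipB]; rw [hδ]
        have hcond : (operators.contains (String.singleton c) && d == 0) = false := by
          simp [hd]
        simp only [PySem.List.enumerate_cons, coA, if_neg h1, if_neg h2, hcond,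
          Bool.false_eq_true, if_false, hskip, if_neg hd]
        exact ih d (i + 1) hd

theorem coA_eq_mainB (operators : List String) :
    ∀ (n : Nat) (l : List Char), l.length ≤ n → ∀ (i : Int),
      coA operators (PySem.List.enumerate l i) 0 = mainB operators l i := by
  intro n
  induction n with
  | zero =>
    intro l hl i
    have h : l = [] := List.eq_nil_of_length_eq_zero (Nat.le_zero.mp hl)
    subst h
    simp [PySem.List.enumerate_nil, coA, mainB]
  | succ n ih =>
    intro l hl i
    cases l with
    | nil => simp [PySem.List.enumerate_nil, coA, mainB]
    | cons c rest =>
      have hrest : rest.length ≤ n := Nat.succ_le_succ_iff.mp hl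
      by_cases h1 : c = '('
      · have hp : c = '(' ∨ c = ')' := Or.inl h1
        have hδ : (0:Int) + (if c = '(' then (1:Int) else 0) - (if c = ')' then 1 else 0) = 1 := by
          simp [h1]
        have hskip : skipB (c :: rest) 0 i = skipB rest 1 (i + 1) := by
          simp only [skipB]; rw [hδ]; simp
        simp only [PySem.List.enumerate_cons, coA, if_pos h1, mainB, if_pos hp, hskip]
        rw [show (0:Int) + 1 = 1 by ring]
        rw [coA_skip operators rest 1 (i + 1) one_ne_zero]
        exact ih _ (le_trans (skipB_len _ _ _) hrest) _
      · by_cases h2 : c = ')'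
        · have hp : c = '(' ∨ c = ')' := Or.inr h2
          have hδ : (0:Int) + (if c = '(' then (1:Int) else 0) - (if c = ')' then 1 else 0) = -1 := by
            simp [h2]
          have hskip : skipB (c :: rest) 0 i = skipB rest (-1) (i + 1) := by
            simp only [skipB]; rw [hδ]; simp
          simp only [PySem.List.enumerate_cons, coA, if_neg h1, if_pos h2, mainB, if_pos hp, hskip]
          rw [show (0:Int) - 1 = -1 by ring]
          rw [coA_skip operators rest (-1) (i + 1) (by norm_num)]
          exact ih _ (le_trans (skipB_len _ _ _) hrest) _
        · have hp : ¬ (c = '(' ∨ c = ')') := by tauto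
          have ihr := ih rest hrest (i + 1)
          simp only [PySem.List.enumerate_cons, coA, if_neg h1, if_neg h2, mainB, if_neg hp]
          cases hop : operators.contains (String.singleton c) <;>
            cases hneg : (i == 0 && c == '-') <;> simp [ihr]

-- ===== VERDICT =====
theorem check_operator_spec : Claim_equal_check_operator := by
  intro operators input _
  unfold Spec_check_operator check_operator check_operator_alt
  exact coA_eq_mainB operators input.toList.length input.toList le_rfl 0
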